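-- pv_equiv track=rewrite | github.com/AnvithaK0203/Soil_metagenome | clean_data.py | suffix_lookup
-- ===== SOURCE A (Python) =====
-- def suffix_lookup(columns: list[str]) -> dict[str, str]:
--     lookup: dict[str, str] = {}
--     collisions: set[str] = set()
--     for column in columns:
--         if column == "sample" or "|" not in column:
--             continue
--         _, _, suffix = column.partition("|")
--         suffix = suffix.strip()
--         if suffix in lookup and lookup[suffix] != column:
--             collisions.add(suffix)
--         else:
--             lookup[suffix] = column
--     for suffix in collisions:
--         lookup.pop(suffix, None)
--     return lookup
-- ===== SOURCE B (Python) =====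
-- def suffix_lookup(columns: list[str]) -> dict[str, str]:
--     groups: dict[str, set[str]] = {}
--     for column in columns:
--         if column == "sample" or "|" not in column:
--             continue
--         _, _, suffix = column.partition("|")
--         suffix = suffix.strip()
--         groups.setdefault(suffix, set()).add(column)
--     return {suffix: next(iter(cols)) for suffix, cols in groups.items() if len(cols) == 1}
-- ===== Notes on version B (the rewrite author's own statement) =====
-- stated objective: alternative
-- what changed: Replaces A's representative-plus-collision-set bookkeeping (lookup dict plus collisions set plus a second pop loop) with a group-all-then-filter structure: one multimap suffix->set of distinct columns, then a comprehension keeping only suffixes with exactly one distinct column.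
import Mathlib
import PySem

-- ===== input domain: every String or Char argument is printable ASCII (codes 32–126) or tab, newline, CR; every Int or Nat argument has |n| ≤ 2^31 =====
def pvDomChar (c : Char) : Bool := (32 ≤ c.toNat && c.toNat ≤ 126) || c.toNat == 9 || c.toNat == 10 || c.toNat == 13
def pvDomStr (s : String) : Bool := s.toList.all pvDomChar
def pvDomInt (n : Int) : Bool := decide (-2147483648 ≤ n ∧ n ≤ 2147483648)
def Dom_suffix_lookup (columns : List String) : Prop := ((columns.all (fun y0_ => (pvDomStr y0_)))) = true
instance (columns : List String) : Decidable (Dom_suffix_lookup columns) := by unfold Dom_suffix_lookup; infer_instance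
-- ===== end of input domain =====

-- B replaces A's representative-plus-collision-set bookkeeping with a group-all-then-filter
-- structure (multimap suffix -> set of distinct columns, then keep singleton groups); alternative
-- decomposition of the same cost, proved to return the same dict.


-- ===== PORT A =====
-- shared helper: suffix = column.partition("|")[2].strip()  (hand port of str.partition:
-- the characters after the FIRST '|'; exact here because both callers guard '"|" in column';
-- strip is PySem.Chars.strip)
def pvSuffix (column : String) : String :=
  String.ofList (PySem.Chars.strip ((column.toList.dropWhile (fun c => c ≠ '|')).drop 1))

-- one iteration of A's first loop over (lookup, collisions)
def pvStepA (st : PySem.Dict String String × PySem.Set String) (column : String) :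
    PySem.Dict String String × PySem.Set String :=
  if column == "sample" || !(PySem.Str.isIn "|" column) then st
  else
    let suffix := pvSuffix column
    match st.1.get? suffix with
    | some v => if v ≠ column then (st.1, PySem.Set.add st.2 suffix)
                else (st.1.insert suffix column, st.2)
    | none => (st.1.insert suffix column, st.2)

def suffix_lookup (columns : List String) : List (String × String) :=
  let st := columns.foldl pvStepA (PySem.Dict.empty, PySem.Set.empty)
  -- for suffix in collisions: lookup.pop(suffix, None)   (pop with default = erase, never raises;
  -- the result is independent of the set's iteration order: each erase just deletes one key)
  (st.2.foldl (fun d s => d.erase s) st.1).items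

-- ===== PORT B =====
-- one iteration of B's grouping loop: groups.setdefault(suffix, set()).add(column)
def pvStepB (g : PySem.Dict String (PySem.Set String)) (column : String) :
    PySem.Dict String (PySem.Set String) :=
  if column == "sample" || !(PySem.Str.isIn "|" column) then g
  else g.modify (pvSuffix column) PySem.Set.empty (fun s => PySem.Set.add s column)

def suffix_lookup_alt (columns : List String) : List (String × String) :=
  let groups := columns.foldl pvStepB PySem.Dict.empty
  -- {suffix: next(iter(cols)) for suffix, cols in groups.items() if len(cols) == 1}
  -- (next(iter(cols)) on a one-element set is its single element: headI)
  groups.items.filterMap (fun q => if q.2.length = 1 then some (q.1, q.2.headI) else none)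

-- ===== PRECONDITION & SPEC =====
def Spec_suffix_lookup (columns : List String) (out : List (String × String)) : Prop := out = suffix_lookup_alt columns
instance (columns : List String) (out : List (String × String)) : Decidable (Spec_suffix_lookup columns out) := by unfold Spec_suffix_lookup; infer_instance

-- ===== CLAIM (what is proved, stated in full; the proofs are below) =====
def Claim_equal_suffix_lookup : Prop := ∀ (columns : List String), Dom_suffix_lookup columns → Spec_suffix_lookup columns (suffix_lookup columns)

-- ===== LEMMAS AND PROOFS =====

-- relation between one lookup entry of A and the corresponding group entry of B
def pvEntryRel (p : String × String) (q : String × PySem.Set String) : Prop :=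
  p.1 = q.1 ∧ p.2 ∈ q.2 ∧ (q.2.length = 1 → q.2 = [p.2])

-- the loop invariant tying A's (lookup, collisions) to B's groups
def pvInv (d : PySem.Dict String String) (coll : PySem.Set String)
    (g : PySem.Dict String (PySem.Set String)) : Prop :=
  List.Forall₂ pvEntryRel d.items g.items ∧ g.keys.Nodup ∧
  (∀ s, s ∈ coll ↔ ∃ q ∈ g.items, q.1 = s ∧ 2 ≤ q.2.length)

lemma pvMapFst {ds : List (String × String)} {gs : List (String × PySem.Set String)}
    (h : List.Forall₂ pvEntryRel ds gs) : ds.map Prod.fst = gs.map Prod.fst := by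
  induction h with
  | nil => rfl
  | cons hr _ ih => simp [ih, hr.1]

lemma pvTwoLen {α : Type} {a b : α} {l : List α} (ha : a ∈ l) (hb : b ∈ l) (hne : a ≠ b) :
    2 ≤ l.length := by
  match l with
  | [] => cases ha
  | [x] => simp_all
  | _ :: _ :: _ => simp

lemma pvEraseFold (coll : List String) (d : PySem.Dict String String) :
    (coll.foldl (fun d s => d.erase s) d).items
      = d.items.filter (fun p => !(coll.contains p.1)) := by
  induction coll generalizing d with
  | nil => simp
  | cons s cs ih =>
      rw [List.foldl_cons, ih]
      show ((d.erase s).items.filter _) = _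
      simp only [PySem.Dict.erase, List.filter_filter]
      apply List.filter_congr
      intro p _
      rw [Bool.and_comm]
      by_cases hps : p.1 = s
      · simp [hps]
      · simp [hps]

-- membership-aware Forall₂ map lemma for the two in-place updates
lemma pvForallTwoMap {fA : String × String → String × String}
    {fB : String × PySem.Set String → String × PySem.Set String}
    {ds : List (String × String)} {gs : List (String × PySem.Set String)}
    (h : List.Forall₂ pvEntryRel ds gs)
    (hf : ∀ p ∈ ds, ∀ q ∈ gs, pvEntryRel p q → pvEntryRel (fA p) (fB q)) :
    List.Forall₂ pvEntryRel (ds.map fA) (gs.map fB) := by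
  induction h with
  | nil => exact .nil
  | @cons p q ds' gs' hr htl ih =>
      refine .cons (hf p (by simp) q (by simp) hr) (ih ?_)
      intro p' hp' q' hq' hr'
      exact hf p' (by simp [hp']) q' (by simp [hq']) hr'

-- every group entry has a partner lookup entry
lemma pvPartner {ds : List (String × String)} {gs : List (String × PySem.Set String)}
    (h : List.Forall₂ pvEntryRel ds gs) {q : String × PySem.Set String} (hq : q ∈ gs) :
    ∃ p ∈ ds, pvEntryRel p q := by
  induction h with
  | nil => cases hq
  | @cons p' q' ds' gs' hr _ ih =>
      rcases List.mem_cons.mp hq with h1 | h1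
      · exact ⟨p', List.mem_cons_self, h1 ▸ hr⟩
      · obtain ⟨p, hp, hpr⟩ := ih h1
        exact ⟨p, List.mem_cons_of_mem _ hp, hpr⟩

lemma pvStepInv (d : PySem.Dict String String) (coll : PySem.Set String)
    (g : PySem.Dict String (PySem.Set String)) (c : String) (h : pvInv d coll g) :
    pvInv (pvStepA (d, coll) c).1 (pvStepA (d, coll) c).2 (pvStepB g c) := by
  obtain ⟨hrel, hnd, hcoll⟩ := h
  by_cases hg : (c == "sample" || !(PySem.Str.isIn "|" c)) = true
  · unfold pvStepA pvStepB
    rw [if_pos hg, if_pos hg]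
    exact ⟨hrel, hnd, hcoll⟩
  · simp only [pvStepA, pvStepB, PySem.Dict.modify, hg, Bool.false_eq_true, if_false]
    have hkeys : d.keys = g.keys := by
      simp only [PySem.Dict.keys]
      exact pvMapFst hrel
    have hndd : d.keys.Nodup := by rw [hkeys]; exact hnd
    by_cases hk : pvSuffix c ∈ g.keys
    · -- suffix already grouped
      have hcont : g.contains (pvSuffix c) = true :=
        (PySem.Dict.contains_iff_mem_keys g _).mpr hk
      have hcontd : d.contains (pvSuffix c) = true :=
        (PySem.Dict.contains_iff_mem_keys d _).mpr (hkeys ▸ hk)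
      obtain ⟨w, hw⟩ : ∃ w, g.get? (pvSuffix c) = some w := by
        have := PySem.Dict.contains_eq_isSome_get? g (pvSuffix c)
        rw [hcont] at this
        exact Option.isSome_iff_exists.mp this.symm
      obtain ⟨v, hv⟩ : ∃ v, d.get? (pvSuffix c) = some v := by
        have := PySem.Dict.contains_eq_isSome_get? d (pvSuffix c)
        rw [hcontd] at this
        exact Option.isSome_iff_exists.mp this.symm
      have hgetD : g.getD (pvSuffix c) PySem.Set.empty = w :=
        PySem.Dict.getD_of_get?_eq_some g _ hw
      have hgu : ∀ q ∈ g.items, q.1 = pvSuffix c → q.2 = w := by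
        intro q hqm hqs
        have h1 : g.get? (pvSuffix c) = some q.2 :=
          PySem.Dict.get?_of_mem_items g (by rw [← hqs]; exact hqm) hnd
        rw [hw] at h1; exact (Option.some.inj h1).symm
      have hdu : ∀ p ∈ d.items, p.1 = pvSuffix c → p.2 = v := by
        intro p hpm hps
        have h1 : d.get? (pvSuffix c) = some p.2 :=
          PySem.Dict.get?_of_mem_items d (by rw [← hps]; exact hpm) hndd
        rw [hv] at h1; exact (Option.some.inj h1).symm
      -- the s-group contains A's stored representative v
      obtain ⟨q0, hq0m, hq0s⟩ : ∃ q0 ∈ g.items, q0.1 = pvSuffix c := by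
        simp only [PySem.Dict.keys, List.mem_map] at hk
        obtain ⟨q0, hq0, hq0s⟩ := hk
        exact ⟨q0, hq0, hq0s⟩
      obtain ⟨p0, hp0m, hp0r⟩ := pvPartner hrel hq0m
      have hvw : v ∈ w := by
        have := hp0r.2.1
        rw [hgu q0 hq0m hq0s] at this
        rwa [hdu p0 hp0m (hp0r.1.trans hq0s)] at this
      rw [hv, hgetD]
      by_cases hvc : v = c
      · -- re-insert of the same column: both dicts are unchanged as item lists
        simp only [hvc, ne_eq, not_true_eq_false, if_false]
        have hcw : c ∈ w := hvc ▸ hvw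
        have hA : (d.insert (pvSuffix c) c).items = d.items := by
          rw [PySem.Dict.items_insert_of_contains d c hcontd]
          have : ∀ p ∈ d.items, (if (p.1 == pvSuffix c) = true then (pvSuffix c, c) else p) = p := by
            intro p hp
            by_cases hps : p.1 = pvSuffix c
            · simp only [hps, beq_self_eq_true, if_true]
              have hpc : p.2 = c := (hdu p hp hps).trans hvc
              rw [← hps, ← hpc]
            · simp [hps]
          rw [List.map_congr_left this]
          simp
        have hB : (g.insert (pvSuffix c) (PySem.Set.add w c)).items = g.items := by
          rw [PySem.Dict.items_insert_of_contains g _ hcont]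
          have : ∀ q ∈ g.items,
              (if (q.1 == pvSuffix c) = true then (pvSuffix c, PySem.Set.add w c) else q) = q := by
            intro q hq
            by_cases hqs : q.1 = pvSuffix c
            · simp only [hqs, beq_self_eq_true, if_true]
              rw [PySem.Set.add_of_mem hcw, ← hqs, ← hgu q hq hqs]

            · simp [hqs]
          rw [List.map_congr_left this]
          simp
        refine ⟨?_, ?_, ?_⟩
        · rw [hA, hB]; exact hrel
        · show (PySem.Dict.insert _ _ _).keys.Nodup
          simp only [PySem.Dict.keys, hB]; exact hnd
        · intro t
          simp only [hB] at *
          exact hcoll t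
      · -- collision: A records the suffix, B's group gains a second distinct column
        simp only [ne_eq, hvc, not_false_eq_true, if_true]
        have hBitems : (g.insert (pvSuffix c) (PySem.Set.add w c)).items
            = g.items.map (fun q =>
                if (q.1 == pvSuffix c) = true then (pvSuffix c, PySem.Set.add w c) else q) :=
          PySem.Dict.items_insert_of_contains g _ hcont
        have h2w : 2 ≤ (PySem.Set.add w c).length := by
          refine pvTwoLen (a := v) (b := c) ?_ ?_ hvc
          · exact (PySem.Set.mem_add w c v).mpr (Or.inl hvw)
          · exact (PySem.Set.mem_add w c c).mpr (Or.inr rfl)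
        refine ⟨?_, ?_, ?_⟩
        · -- Forall₂ : lookup unchanged vs mapped groups
          have := pvForallTwoMap (fA := id) (fB := fun q =>
              if (q.1 == pvSuffix c) = true then (pvSuffix c, PySem.Set.add w c) else q) hrel ?_
          · simpa [hBitems] using this
          · intro p hp q hq hr
            by_cases hqs : q.1 = pvSuffix c
            · have hps : p.1 = pvSuffix c := hr.1.trans hqs
              have hpv : p.2 = v := hdu p hp hps
              have hqw : q.2 = w := hgu q hq hqs
              simp only [hqs, beq_self_eq_true, if_true, id]
              refine ⟨hps, ?_, ?_⟩
              · exact (PySem.Set.mem_add w c p.2).mpr (Or.inl (hqw ▸ hr.2.1))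
              · intro hlen
                exfalso
                simp only at hlen
                omega
            · 
              simp [hqs, id]
              exact hr
        · show (PySem.Dict.insert _ _ _).keys.Nodup
          rw [PySem.Dict.keys_insert_of_contains g _ hcont]; exact hnd
        · intro t
          rw [PySem.Set.mem_add]
          constructor
          · rintro (ht | rfl)
            · obtain ⟨q1, hq1, hq1t, hq1l⟩ := (hcoll t).mp ht
              by_cases hq1s : q1.1 = pvSuffix c
              · refine ⟨(pvSuffix c, PySem.Set.add w c), ?_, hq1s ▸ hq1t, h2w⟩
                rw [hBitems]
                exact List.mem_map.mpr ⟨q1, hq1, by simp [hq1s]⟩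
              · refine ⟨q1, ?_, hq1t, hq1l⟩
                rw [hBitems]
                exact List.mem_map.mpr ⟨q1, hq1, by simp [hq1s]⟩
            · refine ⟨(pvSuffix c, PySem.Set.add w c), ?_, hq0s ▸ rfl, h2w⟩
              rw [hBitems]
              exact List.mem_map.mpr ⟨q0, hq0m, by simp [hq0s]⟩
          · rintro ⟨q', hq', hq't, hq'l⟩
            rw [hBitems] at hq'
            obtain ⟨q1, hq1, hfq1⟩ := List.mem_map.mp hq'
            by_cases hq1s : q1.1 = pvSuffix c
            · right
              rw [← hq't, ← hfq1]
              simp [hq1s]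
            · left
              rw [← hfq1] at hq't hq'l
              
              rw [if_neg (by simpa using hq1s)] at hq't hq'l
              exact (hcoll t).mpr ⟨q1, hq1, hq't, hq'l⟩
    · -- fresh suffix: both sides append a new entry
      have hcont : g.contains (pvSuffix c) = false := by
        rw [← Bool.not_eq_true, PySem.Dict.contains_iff_mem_keys]; exact hk
      have hcontd : d.contains (pvSuffix c) = false := by
        rw [← Bool.not_eq_true, PySem.Dict.contains_iff_mem_keys]; exact hkeys ▸ hk
      have hv : d.get? (pvSuffix c) = none :=
        (PySem.Dict.get?_eq_none_iff_not_mem_keys d _).mpr (hkeys ▸ hk)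
      rw [hv, PySem.Dict.getD_of_not_contains g _ hcont]
      have hadd : PySem.Set.add (PySem.Set.empty : PySem.Set String) c = [c] := by
        simp [PySem.Set.add_of_not_mem, PySem.Set.empty]
      rw [hadd]
      refine ⟨?_, ?_, ?_⟩
      · rw [PySem.Dict.items_insert_of_not_contains d c hcontd,
          PySem.Dict.items_insert_of_not_contains g [c] hcont]
        exact List.rel_append hrel (.cons ⟨rfl, by simp, by simp⟩ .nil)
      · show (PySem.Dict.insert _ _ _).keys.Nodup
        rw [PySem.Dict.keys_insert_of_not_contains g [c] hcont]
        rw [List.nodup_append]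
        refine ⟨hnd, List.nodup_singleton _, ?_⟩
        intro a ha b hb hab
        have hbe : b = pvSuffix c := by simpa using hb
        exact hk (hbe ▸ hab ▸ ha)
      · intro t
        rw [PySem.Dict.items_insert_of_not_contains g [c] hcont]
        constructor
        · intro ht
          obtain ⟨q1, hq1, hq1t, hq1l⟩ := (hcoll t).mp ht
          exact ⟨q1, List.mem_append_left _ hq1, hq1t, hq1l⟩
        · rintro ⟨q', hq', hq't, hq'l⟩
          rcases List.mem_append.mp hq' with h1 | h1
          · exact (hcoll t).mpr ⟨q', h1, hq't, hq'l⟩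
          · simp at h1
            rw [h1] at hq'l
            simp at hq'l

lemma pvLoopInv (cols : List String) (d : PySem.Dict String String) (coll : PySem.Set String)
    (g : PySem.Dict String (PySem.Set String)) (h : pvInv d coll g) :
    pvInv (cols.foldl pvStepA (d, coll)).1 (cols.foldl pvStepA (d, coll)).2
      (cols.foldl pvStepB g) := by
  induction cols generalizing d coll g with
  | nil => exact h
  | cons c cs ih =>
      simpa using ih (pvStepA (d, coll) c).1 (pvStepA (d, coll) c).2 (pvStepB g c)
        (pvStepInv d coll g c h)

lemma pvFinal (ds : List (String × String)) (gs : List (String × PySem.Set String))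
    (coll : PySem.Set String) (h : List.Forall₂ pvEntryRel ds gs)
    (hc : ∀ q ∈ gs, (q.1 ∈ coll ↔ 2 ≤ q.2.length)) :
    ds.filter (fun p => !(coll.contains p.1))
      = gs.filterMap (fun q => if q.2.length = 1 then some (q.1, q.2.headI) else none) := by
  induction h with
  | nil => rfl
  | @cons p q ds' gs' hr _ ih =>
      have hq := hc q (by simp)
      have ih' := ih (fun q' hq' => hc q' (by simp [hq']))
      by_cases h2 : 2 ≤ q.2.length
      · have hb : coll.contains p.1 = true := by
          rw [hr.1]; exact List.contains_iff_mem.mpr (hq.mpr h2)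
        have hne1 : ¬ q.2.length = 1 := by omega
        simp only [List.filter_cons, List.filterMap_cons, hb, Bool.not_true, hne1, if_false,
          Bool.false_eq_true]
        exact ih'
      · have hm : p.1 ∉ coll := by
          rw [hr.1]; exact fun hm => h2 (hq.mp hm)
        have h1 : q.2.length = 1 := by
          have : 0 < q.2.length := List.length_pos_of_mem hr.2.1
          omega
        have hval : q.2 = [p.2] := hr.2.2 h1
        simp [hm, hval, ← hr.1]
        simpa using ih'

-- ===== VERDICT (by name: the statement is the Claim_ definition above) =====
theorem suffix_lookup_spec : Claim_equal_suffix_lookup := by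
  intro columns _
  unfold Spec_suffix_lookup suffix_lookup suffix_lookup_alt
  have h0 : pvInv PySem.Dict.empty PySem.Set.empty PySem.Dict.empty := by
    refine ⟨List.Forall₂.nil, by simp [PySem.Dict.keys, PySem.Dict.empty], ?_⟩
    intro s; simp [PySem.Set.empty, PySem.Dict.empty]
  have hinv := pvLoopInv columns PySem.Dict.empty PySem.Set.empty PySem.Dict.empty h0
  obtain ⟨hrel, hnd, hcoll⟩ := hinv
  rw [pvEraseFold]
  apply pvFinal _ _ _ hrel
  intro q hq
  rw [hcoll q.1]
  constructor
  · rintro ⟨q', hq', hk, hl⟩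
    have : q = q' := by
      have hfst : q'.1 = q.1 := hk
      -- unique key among Nodup keys
      have := List.inj_on_of_nodup_map (f := Prod.fst) ?_ hq' hq hfst
      · exact this.symm
      · simpa [PySem.Dict.keys] using hnd
    subst this; exact hl
  · intro hl; exact ⟨q, hq, rfl, hl⟩
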